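-- pv_equiv track=rewrite | github.com/ryosuke-terasaka1/Estimated_app | app/usecases/modify_part.py | similary_press_score
-- ===== SOURCE A (Python) =====
-- def similarly_score(motion, music):
--     plus_point = 1
--     minus_point = 0
--     score_list = []
--     for i in range(len(motion)):
--         if motion[i]==1 and music[i]==1:
--             score_list.append(plus_point)
--         elif motion[i]==0 and music[i]==0:
--             score_list.append(0)
--         elif motion[i] != music[i]:
--             score_list.append(0)
--     return score_list
--
-- def similary_press_score(motion, music, length):
--     score_sentence = similarly_score(motion, music)
--     score_sum = 0
--     press_score_list = []
--     for i in range(len(score_sentence)):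
--         score_sum += score_sentence[i]
--         if i % length == length-1:
--             press_score_list.append(score_sum)
--             score_sum = 0
--     return press_score_list
-- ===== SOURCE B (Python) =====
-- def similary_press_score(motion, music, length):
--     scores = []
--     for m, s in zip(motion, music):
--         if m == 1 and s == 1:
--             scores.append(1)
--         elif (m == 0 and s == 0) or m != s:
--             scores.append(0)
--     return [sum(scores[k:k + length]) for k in range(0, len(scores) - length + 1, length)]
-- ===== Notes on version B (the rewrite author's own statement) =====
-- stated objective: simpler
-- what changed: Scores pairs in one zip loop (merging the two zero-scoring branches) and replaces the index-driven running-sum/modulo window loop by a slice-sum comprehension over window start offsets; Pre_ excludes inputs where A raises (music shorter than motion: IndexError; length 0: ZeroDivisionError once the score list is nonempty, and on the remaining length-0 inputs A returns [] while B's range step of 0 raises ValueError).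
-- outside the precondition, e.g. on similary_press_score([], [], 0): A returns [], B raises ValueError
import Mathlib
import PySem

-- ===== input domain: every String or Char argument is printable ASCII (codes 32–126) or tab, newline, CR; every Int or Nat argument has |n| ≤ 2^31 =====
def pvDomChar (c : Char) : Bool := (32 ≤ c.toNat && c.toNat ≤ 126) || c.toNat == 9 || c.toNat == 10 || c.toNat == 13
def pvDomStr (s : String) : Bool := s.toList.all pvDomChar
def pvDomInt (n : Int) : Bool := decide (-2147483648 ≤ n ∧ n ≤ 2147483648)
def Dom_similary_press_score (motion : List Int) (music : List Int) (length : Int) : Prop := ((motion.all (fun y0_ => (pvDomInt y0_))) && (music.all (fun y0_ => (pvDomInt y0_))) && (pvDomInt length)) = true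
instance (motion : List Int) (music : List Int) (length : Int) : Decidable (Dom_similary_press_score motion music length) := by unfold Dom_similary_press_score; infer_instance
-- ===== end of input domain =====

-- B scores the aligned pairs in one zip loop and sums fixed windows by slicing at window
-- start offsets, instead of A's two index loops with a running sum and modulo test (objective: simpler).

-- ===== PORT A =====
-- helper: Python's similarly_score
def similarly_score (motion : List Int) (music : List Int) : List Int :=
  (PySem.List.pyRange 0 (PySem.List.len motion) 1).foldl
    (fun score_list i =>
      if PySem.List.pyGetD motion i 0 = 1 ∧ PySem.List.pyGetD music i 0 = 1 then score_list ++ [(1 : Int)]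
      else if PySem.List.pyGetD motion i 0 = 0 ∧ PySem.List.pyGetD music i 0 = 0 then score_list ++ [(0 : Int)]
      else if PySem.List.pyGetD motion i 0 ≠ PySem.List.pyGetD music i 0 then score_list ++ [(0 : Int)]
      else score_list) []

def similary_press_score (motion : List Int) (music : List Int) (length : Int) : List Int :=
  let score_sentence := similarly_score motion music
  -- window loop: running sum, flush when i % length == length-1
  ((PySem.List.pyRange 0 (PySem.List.len score_sentence) 1).foldl
    (fun (st : List Int × Int) i =>
      let score_sum := st.2 + PySem.List.pyGetD score_sentence i 0
      if PySem.Int.mod i length = length - 1 then (st.1 ++ [score_sum], 0) else (st.1, score_sum))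
    ([], 0)).1

-- ===== PORT B =====
def similary_press_score_alt (motion : List Int) (music : List Int) (length : Int) : List Int :=
  let scores : List Int := (motion.zip music).foldl
    (fun acc p =>
      if p.1 = 1 ∧ p.2 = 1 then acc ++ [(1 : Int)]
      else if (p.1 = 0 ∧ p.2 = 0) ∨ p.1 ≠ p.2 then acc ++ [(0 : Int)]
      else acc) []
  (PySem.List.pyRange 0 ((scores.length : Int) - length + 1) length).map
    (fun k => (PySem.List.slice scores (some k) (some (k + length))).sum)

-- ===== PRECONDITION & SPEC =====
-- Pre_ excludes the inputs where A raises: music shorter than motion (IndexError in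
-- similarly_score) and length = 0 (ZeroDivisionError in i % length once the score list is
-- nonempty; when the score list is empty A returns [] but B's range(..., 0) raises
-- ValueError, so those degenerate length-0 inputs stay excluded too).
def Pre_similary_press_score (motion : List Int) (music : List Int) (length : Int) : Prop :=
  motion.length ≤ music.length ∧ length ≠ 0
instance (motion : List Int) (music : List Int) (length : Int) : Decidable (Pre_similary_press_score motion music length) := by unfold Pre_similary_press_score; infer_instance

def pvWitness_similary_press_score : List Int × List Int × Int := ([1, 0, 1, 0], [1, 1, 1, 0], 2)

def Spec_similary_press_score (motion : List Int) (music : List Int) (length : Int) (out : List Int) : Prop := out = similary_press_score_alt motion music length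
instance (motion : List Int) (music : List Int) (length : Int) (out : List Int) : Decidable (Spec_similary_press_score motion music length out) := by unfold Spec_similary_press_score; infer_instance

-- ===== CLAIM (what is proved, stated in full; the proofs are below) =====
def Claim_equal_similary_press_score : Prop := ∀ (motion : List Int) (music : List Int) (length : Int), Dom_similary_press_score motion music length → Pre_similary_press_score motion music length → Spec_similary_press_score motion music length (similary_press_score motion music length)

-- ===== LEMMAS AND PROOFS =====
lemma pyRange_cons_of_pos {a b L : Int} (hL : 0 < L) (hab : a < b) :
    PySem.List.pyRange a b L = a :: PySem.List.pyRange (a + L) b L := by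
  rw [PySem.List.pyRange_of_pos _ _ hL, PySem.List.pyRange_of_pos _ _ hL]
  have h1 : (b - a + L - 1) / L = (b - a - 1) / L + 1 := by
    rw [show b - a + L - 1 = (b - a - 1) + 1 * L by ring,
        Int.add_mul_ediv_right _ _ (ne_of_gt hL)]
  have hQ0 : 0 ≤ (b - a - 1) / L := Int.ediv_nonneg (by omega) hL.le
  by_cases h2 : a + L < b
  · rw [if_pos hab, if_pos h2, show b - (a + L) + L - 1 = b - a - 1 by ring, h1,
        show ((b - a - 1) / L + 1).toNat = ((b-a-1)/L).toNat + 1 by omega,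
        List.range_succ_eq_map]
    simp only [List.map_cons, Nat.cast_zero, mul_zero, add_zero, List.map_map]
    congr 1
    apply List.map_congr_left
    intro k _
    simp only [Function.comp_apply]
    push_cast
    ring
  · have hz : (b - a - 1) / L = 0 := Int.ediv_eq_zero_of_lt (by omega) (by omega)
    rw [if_pos hab, if_neg h2, h1, hz]
    simp

lemma pyRange_shift {b L : Int} (hL : 0 < L) :
    PySem.List.pyRange L b L = (PySem.List.pyRange 0 (b - L) L).map (· + L) := by
  rw [PySem.List.pyRange_of_pos _ _ hL, PySem.List.pyRange_of_pos _ _ hL]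
  rw [if_congr (show (L < b) ↔ (0 < b - L) by omega) rfl rfl]
  simp only [sub_zero, List.map_map]
  rw [show b - L + L - 1 = -L + b + L - 1 by ring]
  apply List.map_congr_left
  intro k _
  simp only [Function.comp_apply]
  ring

lemma pyRange_neg_empty {b L : Int} (hL : L < 0) (hb : 0 ≤ b) :
    PySem.List.pyRange 0 b L = [] := by
  simp [PySem.List.pyRange, show ¬(L=0) by omega, show ¬(0:Int) < L by omega, show ¬ b < 0 by omega]


lemma Fpoint (acc : List Int) (a b : Int) :
    (if a = 1 ∧ b = 1 then acc ++ [(1 : Int)]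
     else if a = 0 ∧ b = 0 then acc ++ [(0 : Int)]
     else if a ≠ b then acc ++ [(0 : Int)] else acc)
    = (if a = 1 ∧ b = 1 then acc ++ [(1 : Int)]
       else if (a = 0 ∧ b = 0) ∨ a ≠ b then acc ++ [(0 : Int)] else acc) := by
  by_cases h1 : a = 1 ∧ b = 1 <;> by_cases h2 : a = 0 ∧ b = 0 <;> by_cases h3 : a = b <;>
    simp_all

lemma scores_eq (motion music : List Int) (h : motion.length ≤ music.length) :
    similarly_score motion music =
    (motion.zip music).foldl
      (fun acc p =>
        if p.1 = 1 ∧ p.2 = 1 then acc ++ [(1 : Int)]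
        else if (p.1 = 0 ∧ p.2 = 0) ∨ p.1 ≠ p.2 then acc ++ [(0 : Int)]
        else acc) [] := by
  unfold similarly_score
  have hzlen : (motion.zip music).length = motion.length := by
    simp [List.length_zip]; omega
  have hcon : ∀ (acc : List Int), ∀ i ∈ PySem.List.pyRange 0 (PySem.List.len motion) 1,
      (fun score_list i =>
        if PySem.List.pyGetD motion i 0 = 1 ∧ PySem.List.pyGetD music i 0 = 1 then score_list ++ [(1 : Int)]
        else if PySem.List.pyGetD motion i 0 = 0 ∧ PySem.List.pyGetD music i 0 = 0 then score_list ++ [(0 : Int)]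
        else if PySem.List.pyGetD motion i 0 ≠ PySem.List.pyGetD music i 0 then score_list ++ [(0 : Int)]
        else score_list) acc i =
      (fun acc i =>
        (fun (acc : List Int) (p : Int × Int) =>
          if p.1 = 1 ∧ p.2 = 1 then acc ++ [(1 : Int)]
          else if (p.1 = 0 ∧ p.2 = 0) ∨ p.1 ≠ p.2 then acc ++ [(0 : Int)]
          else acc) acc
          (PySem.List.pyGetD (motion.zip music) i (0, 0))) acc i := by
    intro acc i hi
    beta_reduce
    have hi' := (PySem.List.mem_pyRange_one).mp hi
    simp only [PySem.List.len] at hi'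
    have h0 : 0 ≤ i := hi'.1
    have h1 : i < (motion.length : Int) := hi'.2
    have hz1 : i < ((motion.zip music).length : Int) := by omega
    rw [PySem.List.pyGetD_eq_getElem motion 0 h0 h1,
        PySem.List.pyGetD_eq_getElem music 0 h0 (by omega),
        PySem.List.pyGetD_eq_getElem (motion.zip music) (0,0) h0 hz1]
    rw [List.getElem_zip]
    exact Fpoint acc (motion[i.toNat]'(by omega)) (music[i.toNat]'(by omega))
  rw [PySem.List.foldl_congr_mem _ _ _ _ hcon]
  rw [show PySem.List.len motion = ((motion.zip music).length : Int) by simp [PySem.List.len, hzlen]]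
  rw [PySem.List.foldl_pyRange_pyGetD' (motion.zip music) (0,0)
      (fun (acc : List Int) (p : Int × Int) =>
        if p.1 = 1 ∧ p.2 = 1 then acc ++ [(1 : Int)]
        else if (p.1 = 0 ∧ p.2 = 0) ∨ p.1 ≠ p.2 then acc ++ [(0 : Int)]
        else acc) [] (le_refl 0)]
  simp

def chunkRef (L : Nat) (ss : List Int) : List Int :=
  if h : 0 < L ∧ L ≤ ss.length then (ss.take L).sum :: chunkRef L (ss.drop L) else []
  termination_by ss.length
  decreasing_by simp; omega

def bodyP (L : Int) (st : List Int × Int) (p : Int × Int) : List Int × Int :=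
  if PySem.Int.mod p.1 L = L - 1 then (st.1 ++ [st.2 + p.2], 0) else (st.1, st.2 + p.2)

lemma mod_add_left {s k L : Int} (hs : PySem.Int.mod s L = 0) :
    PySem.Int.mod (s + k) L = PySem.Int.mod k L := by
  rcases (PySem.Int.mod_eq_zero_iff_dvd s L).mp hs with ⟨c, rfl⟩
  simp [PySem.Int.mod, add_comm]

lemma runNoFire (L : Int) : ∀ (c : List Int) (s : Int) (acc : List Int) (sum : Int),
    (∀ k : Nat, k < c.length → PySem.Int.mod (s + k) L ≠ L - 1) →
    (PySem.List.enumerate c s).foldl (bodyP L) (acc, sum) = (acc, sum + c.sum) := by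
  intro c
  induction c with
  | nil => intro s acc sum _; simp [PySem.List.enumerate_nil]
  | cons x xs ih =>
    intro s acc sum h
    rw [PySem.List.enumerate_cons, List.foldl_cons]
    have h0 : PySem.Int.mod s L ≠ L - 1 := by
      have := h 0 (by simp); simpa using this
    have hb : bodyP L (acc, sum) (s, x) = (acc, sum + x) := by
      simp [bodyP, h0]
    rw [hb, ih (s + 1) acc (sum + x) (by
      intro k hk
      have := h (k + 1) (by simpa using Nat.succ_lt_succ hk)
      push_cast at this ⊢
      convert this using 2
      ring)]
    simp [List.sum_cons]; ring

lemma foldP (L : Int) (hL : 0 < L) : ∀ (n : Nat) (ss : List Int), ss.length = n →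
    ∀ (s : Int) (acc : List Int), 0 ≤ s → PySem.Int.mod s L = 0 →
    ((PySem.List.enumerate ss s).foldl (bodyP L) (acc, 0)).1 = acc ++ chunkRef L.toNat ss := by
  intro n
  induction n using Nat.strong_induction_on with
  | _ n ih =>
    intro ss hlen s acc hs hmod
    by_cases hsmall : ss.length < L.toNat
    · rw [runNoFire L ss s acc 0 ?_]
      · rw [chunkRef, dif_neg (by omega)]
        simp
      · intro k hk
        rw [mod_add_left hmod, PySem.Int.mod_eq_emod_of_pos hL]
        have hkL : (k : Int) < L - 1 := by omega
        rw [Int.emod_eq_of_lt (by positivity) (by omega)]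
        omega
    · have hL1 : 1 ≤ L.toNat := by omega
      set m := L.toNat - 1 with hm
      have hmlt : m < ss.length := by omega
      have hdrop : ss.drop m = ss[m] :: ss.drop (m + 1) := List.drop_eq_getElem_cons hmlt
      have hss : ss = ss.take m ++ ss[m] :: ss.drop (m + 1) := by
        rw [← hdrop, List.take_append_drop]
      have htlen : (ss.take m).length = m := by simp; omega
      conv_lhs => rw [hss]
      rw [PySem.List.enumerate_append, List.foldl_append]
      rw [runNoFire L (ss.take m) s acc 0 ?_]
      · rw [PySem.List.enumerate_cons, List.foldl_cons]
        have hfire : PySem.Int.mod (s + (m : Int)) L = L - 1 := by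
          rw [mod_add_left hmod, PySem.Int.mod_eq_emod_of_pos hL]
          rw [Int.emod_eq_of_lt (by positivity) (by omega)]
          omega
        have hb : bodyP L (acc, 0 + (ss.take m).sum) ((s + (ss.take m).length : Int), ss[m])
            = (acc ++ [0 + (ss.take m).sum + ss[m]], 0) := by
          simp [bodyP, Nat.min_eq_left hmlt.le, hfire]
        rw [hb]
        rw [ih (ss.length - (m + 1)) (by omega) (ss.drop (m + 1)) (by simp)
            (s + (ss.take m).length + 1) (acc ++ [0 + (ss.take m).sum + ss[m]]) (by omega) (by
              rw [htlen, show s + (m : Int) + 1 = s + L by push_cast; omega]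
              rw [mod_add_left hmod, PySem.Int.mod_eq_emod_of_pos hL, Int.emod_self])]
        conv_rhs => rw [chunkRef]
        rw [dif_pos (show 0 < L.toNat ∧ L.toNat ≤ ss.length by omega)]
        have htake : ss.take L.toNat = ss.take m ++ [ss[m]] := by
          rw [show L.toNat = m + 1 by omega, List.take_succ]
          simp [List.getElem?_eq_getElem hmlt]
        have hdrop2 : ss.drop L.toNat = ss.drop (m + 1) := by rw [show L.toNat = m + 1 by omega]
        rw [htake, hdrop2]
        simp [List.append_assoc]
        exact Eq.symm (List.sum_take_succ ss m hmlt)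
      · intro k hk
        rw [mod_add_left hmod, PySem.Int.mod_eq_emod_of_pos hL]
        rw [htlen] at hk
        rw [Int.emod_eq_of_lt (by positivity) (by omega)]
        omega

lemma slice_shift (ss : List Int) {L k : Int} (hL : 0 < L) (hk : 0 ≤ k) :
    PySem.List.slice ss (some (k + L)) (some (k + L + L)) =
    PySem.List.slice (ss.drop L.toNat) (some k) (some (k + L)) := by
  rw [PySem.List.slice_toNat _ (by omega) (by omega),
      PySem.List.slice_toNat _ hk (by omega), List.drop_drop]
  congr 1
  · omega
  · congr 1; omega

lemma chunkB (L : Int) (hL : 0 < L) : ∀ (n : Nat) (ss : List Int), ss.length = n →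
    (PySem.List.pyRange 0 ((ss.length : Int) - L + 1) L).map
      (fun k => (PySem.List.slice ss (some k) (some (k + L))).sum) = chunkRef L.toNat ss := by
  intro n
  induction n using Nat.strong_induction_on with
  | _ n ih =>
    intro ss hlen
    by_cases hsm : ss.length < L.toNat
    · rw [chunkRef, dif_neg (by omega)]
      rw [PySem.List.pyRange_of_pos _ _ hL, if_neg (by omega)]
      simp
    · have h1 : (0 : Int) < (ss.length : Int) - L + 1 := by omega
      rw [pyRange_cons_of_pos hL h1, show (0 : Int) + L = L by ring, pyRange_shift hL,
          List.map_cons, List.map_map, chunkRef, dif_pos (by omega)]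
      congr 1
      · rw [show (0 : Int) + L = L by ring, PySem.List.slice_toNat _ le_rfl hL.le]
        simp
      · rw [← ih (ss.length - L.toNat) (by omega) (ss.drop L.toNat) (by simp)]
        rw [show ((ss.drop L.toNat).length : Int) - L + 1 = (ss.length : Int) - L + 1 - L by
          simp; push_cast; omega]
        apply List.map_congr_left
        intro k hk
        have hk0 : 0 ≤ k := ((PySem.List.mem_pyRange_iff_of_pos hL k).mp hk).1
        simp only [Function.comp_apply]
        rw [slice_shift ss hL hk0]

-- ===== VERDICT (by name: the statement is the Claim_ definition above) =====
theorem similary_press_score_spec : Claim_equal_similary_press_score := by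
  intro motion music length _ hpre
  obtain ⟨hm, hL0⟩ := hpre
  unfold Spec_similary_press_score
  simp only [similary_press_score, similary_press_score_alt]
  rw [scores_eq motion music hm]
  set ss := (motion.zip music).foldl
      (fun acc p =>
        if p.1 = 1 ∧ p.2 = 1 then acc ++ [(1 : Int)]
        else if (p.1 = 0 ∧ p.2 = 0) ∨ p.1 ≠ p.2 then acc ++ [(0 : Int)]
        else acc) [] with hss
  have hrw : (PySem.List.enumerate ss 0).foldl (bodyP length) ([], 0) =
      (PySem.List.pyRange 0 (PySem.List.len ss) 1).foldl
        (fun (st : List Int × Int) i =>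
          let score_sum := st.2 + PySem.List.pyGetD ss i 0
          if PySem.Int.mod i length = length - 1 then (st.1 ++ [score_sum], 0) else (st.1, score_sum))
        ([], 0) := by
    rw [PySem.List.enumerate_eq_map_pyRange ss 0, List.foldl_map]
    rfl
  rw [← hrw]
  rcases lt_trichotomy length 0 with hL | hL | hL
  · rw [runNoFire length ss 0 [] 0 (fun k hk => by
      have := PySem.Int.mod_neg_bounds (0 + (k : Int)) hL
      omega)]
    rw [pyRange_neg_empty hL (by omega)]
    simp
  · exact absurd hL hL0
  · rw [foldP length hL ss.length ss rfl 0 [] le_rfl (by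
      rw [PySem.Int.mod_eq_emod_of_pos hL]; simp)]
    rw [chunkB length hL ss.length ss rfl]
    simp
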